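-- pv_equiv track=rewrite | github.com/pandas-dev/pandas | .venv/lib/python3.12/site-packages/lark/utils.py | small_factors
-- ===== SOURCE A (Python) =====
-- from typing import Callable, Iterator, List, Optional, Tuple, Type, TypeVar, Union, Dict, Any, Sequence, Iterable, AbstractSet
--
-- def small_factors(n: int, max_factor: int) -> List[Tuple[int, int]]:
--     """
--     Splits n up into smaller factors and summands <= max_factor.
--     Returns a list of [(a, b), ...]
--     so that the following code returns n:
--
--     n = 1
--     for a, b in values:
--         n = n * a + b
--
--     Currently, we also keep a + b <= max_factor, but that might change
--     """
--     assert n >= 0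
--     assert max_factor > 2
--     if n <= max_factor:
--         return [(n, 0)]
--
--     for a in range(max_factor, 1, -1):
--         r, b = divmod(n, a)
--         if a + b <= max_factor:
--             return small_factors(r, max_factor) + [(a, b)]
--     assert False, "Failed to factorize %s" % n
-- ===== SOURCE B (Python) =====
-- def small_factors(n, max_factor):
--     """Iterative re-implementation: accumulate (a, b) steps in a loop, then
--     prepend the final base pair and reverse the accumulated steps."""
--     assert n >= 0
--     assert max_factor > 2
--     pairs = []
--     while n > max_factor:
--         for a in range(max_factor, 1, -1):
--             r, b = divmod(n, a)
--             if a + b <= max_factor: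
--                 pairs.append((a, b))
--                 n = r
--                 break
--         else:
--             raise AssertionError("Failed to factorize %s" % n)
--     return [(n, 0)] + pairs[::-1]
-- ===== Notes on version B (the rewrite author's own statement) =====
-- stated objective: alternative
-- what changed: Replaces A's recursion (which rebuilds the result by list concatenation at every level) with an iterative while-loop that accumulates the (a,b) steps in a list and assembles the result once at the end ([(n,0)] + reversed accumulator).
import Mathlib
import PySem

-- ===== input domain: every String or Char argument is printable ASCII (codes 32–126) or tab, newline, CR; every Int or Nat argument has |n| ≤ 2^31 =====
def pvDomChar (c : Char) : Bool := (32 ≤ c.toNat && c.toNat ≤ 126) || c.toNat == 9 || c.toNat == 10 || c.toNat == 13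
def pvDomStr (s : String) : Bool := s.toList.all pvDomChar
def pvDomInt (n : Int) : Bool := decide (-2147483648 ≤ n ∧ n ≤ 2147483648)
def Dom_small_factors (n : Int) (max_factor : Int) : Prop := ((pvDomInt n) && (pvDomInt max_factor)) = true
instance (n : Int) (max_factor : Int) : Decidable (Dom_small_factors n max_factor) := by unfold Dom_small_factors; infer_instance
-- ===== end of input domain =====

-- B re-implements A's recursion as an iterative accumulator loop; return values agree on Pre_ (proved below).

-- ===== PORT A =====
-- inner 'for a in range(max_factor, 1, -1): … if a + b <= max_factor: return …' scan:
-- returns the first a with a + n % a ≤ max_factor, none if the loop falls through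
def sf_scan (l : List Int) (n : Int) (max_factor : Int) : Option Int :=
  match l with
  | [] => none
  | a :: rest => if a + PySem.Int.mod n a ≤ max_factor then some a else sf_scan rest n max_factor

-- fuel makes the recursion total; n.toNat + 1 fuel always suffices on Pre_ (r = n // a < n each step)
def small_factors_go (fuel : Nat) (n : Int) (max_factor : Int) : List (Int × Int) :=
  match fuel with
  | 0 => []   -- never reached on Pre_ with fuel = n.toNat + 1
  | fuel + 1 =>
    if n ≤ max_factor then [(n, 0)]
    else
      match sf_scan (PySem.List.pyRange max_factor 1 (-1)) n max_factor with
      | some a => small_factors_go fuel (PySem.Int.floordiv n a) max_factor ++ [(a, PySem.Int.mod n a)]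
      | none => []   -- 'assert False' raises: outside Pre_ (never reached on Pre_)

def small_factors (n : Int) (max_factor : Int) : List (Int × Int) :=
  small_factors_go (n.toNat + 1) n max_factor

-- ===== PORT B =====
-- the while-loop of Source B: state is (n, pairs); each pass finds the first admissible a
-- (the same for-loop, ported as List.find?), appends (a, b) and sets n := r
def sf_alt_loop (fuel : Nat) (n : Int) (max_factor : Int) (pairs : List (Int × Int)) : Int × List (Int × Int) :=
  match fuel with
  | 0 => (n, pairs)   -- never reached on Pre_ with fuel = n.toNat + 1
  | fuel + 1 =>
    if n > max_factor then
      match (PySem.List.pyRange max_factor 1 (-1)).find? (fun a => decide (a + PySem.Int.mod n a ≤ max_factor)) with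
      | some a => sf_alt_loop fuel (PySem.Int.floordiv n a) max_factor (pairs ++ [(a, PySem.Int.mod n a)])
      | none => (n, pairs)   -- 'raise AssertionError': outside Pre_ (never reached on Pre_)
    else (n, pairs)

def small_factors_alt (n : Int) (max_factor : Int) : List (Int × Int) :=
  let p := sf_alt_loop (n.toNat + 1) n max_factor []
  [(p.1, 0)] ++ p.2.reverse   -- pairs[::-1] = reverse

-- ===== PRECONDITION & SPEC =====
-- Pre_ = exactly A's two asserts; given them A always returns (the scan always finds a = 2 at worst).
def Pre_small_factors (n : Int) (max_factor : Int) : Prop := 0 ≤ n ∧ 2 < max_factor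
instance (n : Int) (max_factor : Int) : Decidable (Pre_small_factors n max_factor) := by unfold Pre_small_factors; infer_instance
def pvWitness_small_factors : Int × Int := (1000, 5)

def Spec_small_factors (n : Int) (max_factor : Int) (out : List (Int × Int)) : Prop := out = small_factors_alt n max_factor
instance (n : Int) (max_factor : Int) (out : List (Int × Int)) : Decidable (Spec_small_factors n max_factor out) := by unfold Spec_small_factors; infer_instance

-- ===== CLAIM (what is proved, stated in full; the proofs are below) =====
def Claim_equal_small_factors : Prop := ∀ (n : Int) (max_factor : Int), Dom_small_factors n max_factor → Pre_small_factors n max_factor → Spec_small_factors n max_factor (small_factors n max_factor)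

-- ===== LEMMAS AND PROOFS =====

-- A's hand-written scan is B's List.find?
theorem sf_scan_eq_find (l : List Int) (n : Int) (max_factor : Int) :
    sf_scan l n max_factor
      = l.find? (fun a => decide (a + PySem.Int.mod n a ≤ max_factor)) := by
  induction l with
  | nil => rfl
  | cons a rest ih =>
    simp only [sf_scan, List.find?]
    by_cases h : a + PySem.Int.mod n a ≤ max_factor <;> simp [h, ih]

-- on Pre_, with n > max_factor the scan succeeds (a = 2 works), and the found a lies in [2, max_factor]
theorem sf_scan_some (n max_factor : Int) (hmf : 2 < max_factor) (_hn : max_factor < n) :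
    ∃ a, sf_scan (PySem.List.pyRange max_factor 1 (-1)) n max_factor = some a
      ∧ 2 ≤ a ∧ a ≤ max_factor ∧ a + PySem.Int.mod n a ≤ max_factor := by
  rw [sf_scan_eq_find]
  have h2 : (2 : Int) ∈ PySem.List.pyRange max_factor 1 (-1) := by
    rw [PySem.List.mem_pyRange_neg_one]; omega
  have hp2 : (2 : Int) + PySem.Int.mod n 2 ≤ max_factor := by
    have := PySem.Int.mod_nonneg (a := n) (b := 2) (by omega)
    have := PySem.Int.mod_lt (a := n) (b := 2) (by omega)
    omega
  have hsome : ((PySem.List.pyRange max_factor 1 (-1)).find?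
      (fun a => decide (a + PySem.Int.mod n a ≤ max_factor))).isSome := by
    rw [List.find?_isSome]
    exact ⟨2, h2, by simpa using hp2⟩
  obtain ⟨a, ha⟩ := Option.isSome_iff_exists.mp hsome
  have hmem := List.mem_of_find?_eq_some ha
  have hpred := List.find?_some ha
  rw [PySem.List.mem_pyRange_neg_one] at hmem
  exact ⟨a, ha, by omega, by omega, by simpa using hpred⟩

-- main loop correspondence: A's recursion equals B's accumulator loop at the same fuel
theorem go_eq_alt (fuel : Nat) : ∀ (n max_factor : Int) (pairs : List (Int × Int)),
    0 ≤ n → 2 < max_factor → n.toNat < fuel →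
    small_factors_go fuel n max_factor ++ pairs.reverse
      = [((sf_alt_loop fuel n max_factor pairs).1, 0)] ++ (sf_alt_loop fuel n max_factor pairs).2.reverse := by
  induction fuel with
  | zero => intro n max_factor pairs _ _ hf; omega
  | succ fuel ih =>
    intro n max_factor pairs hn hmf hf
    by_cases hle : n ≤ max_factor
    · simp [small_factors_go, sf_alt_loop, hle, not_lt.mpr hle]
    · rw [not_le] at hle
      obtain ⟨a, ha, ha2, hamf, hab⟩ := sf_scan_some n max_factor hmf hle
      have hfind := (sf_scan_eq_find (PySem.List.pyRange max_factor 1 (-1)) n max_factor) ▸ ha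
      have hr0 : 0 ≤ PySem.Int.floordiv n a := by
        rw [PySem.Int.floordiv_eq_ediv_of_pos (by omega)]
        exact Int.ediv_nonneg hn (by omega)
      have hrlt : PySem.Int.floordiv n a < n := by
        rw [PySem.Int.floordiv_lt_iff_lt_mul (by omega)]
        nlinarith
      have hfuel : (PySem.Int.floordiv n a).toNat < fuel := by omega
      simp only [small_factors_go, sf_alt_loop, if_neg (not_le.mpr hle), if_pos hle, ha, hfind]
      have hrev : [(a, PySem.Int.mod n a)] ++ pairs.reverse
          = (pairs ++ [(a, PySem.Int.mod n a)]).reverse := by simp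
      rw [List.append_assoc, hrev]
      exact ih (PySem.Int.floordiv n a) max_factor (pairs ++ [(a, PySem.Int.mod n a)]) hr0 hmf hfuel

-- ===== VERDICT (by name: the statement is the Claim_ definition above) =====
theorem small_factors_spec : Claim_equal_small_factors := by
  intro n max_factor _ hpre
  unfold Spec_small_factors small_factors small_factors_alt
  have := go_eq_alt (n.toNat + 1) n max_factor [] hpre.1 hpre.2 (by omega)
  simpa using this
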